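-- pv_equiv track=rewrite | github.com/T-Witmer/PythonSpring2022 | PythonScripts/Python/Lab 7/Hawaii.py | pronounce
-- ===== SOURCE A (Python) =====
-- doubleVowels = {"ei": "ay", "ai": "eye","ae" : "eye", "ao": "ow", "au":"ow", "eu": "eh-oo", "iu": "ew", "oi": "oyo", "ou": "ow", "ui": "ooey"}
--
-- vowels = {"a" : "ah" , "i" : "ee", "e" : "eh", "o": "oh", "u": "oo"}
--
-- consonants = ["h" , "w" , "k", "p", "l", "m", "n",]
--
-- def pronounce(word):
--     word = word.lower()
--     output = ""
--     index = 0
--     while index < len(word):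
--         if word[index: index + 2] in doubleVowels:
--             output += doubleVowels[word[index: index + 2]]
--             index += 2
--
--         elif word[index] in vowels:
--             output += vowels[word[index]]
--             index += 1
--
--         elif word[index] in consonants:
--             if word[index] == "w":
--                 if index == 0:
--                     output += "w"
--                 elif word[index - 1] == "a":
--                     output += "w"
--
--                 elif word[index - 1] in "ie":
--                     output += "v"
--
--                 elif word[index - 1] in "uo":
--                     output += "w"
--                 index += 1
--
--             else:
--                 output += word[index]
--                 index += 1
--         elif word[index] == " ":
--             output = output.strip("-")
--             output += " "
--             index += 1
--
--         elif word[index] == "'":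
--             output = output.strip("-")
--             output += "'"
--             index += 1
--
--         if index >= len(word) or word[index-1] == "'" or word[index-1] == " " or word[index-1] in consonants:
--             output += ""
--         else:
--             output += "-"
--
--     return output.capitalize()
-- ===== SOURCE B (Python) =====
-- doubleVowels = {"ei": "ay", "ai": "eye","ae" : "eye", "ao": "ow", "au":"ow", "eu": "eh-oo", "iu": "ew", "oi": "oyo", "ou": "ow", "ui": "ooey"}
--
-- vowels = {"a" : "ah" , "i" : "ee", "e" : "eh", "o": "oh", "u": "oo"}
--
-- consonants = ["h" , "w" , "k", "p", "l", "m", "n",]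
--
-- def _tokens(word):
--     # one scan: (text, ends_on_vowel, is_boundary) per consumed unit
--     toks = []
--     i = 0
--     while i < len(word):
--         two = word[i:i + 2]
--         if two in doubleVowels:
--             toks.append((doubleVowels[two], True, False))
--             i += 2
--         elif word[i] in vowels:
--             toks.append((vowels[word[i]], True, False))
--             i += 1
--         elif word[i] == "w":
--             if i == 0 or word[i - 1] in "aou":
--                 t = "w"
--             elif word[i - 1] in "ie":
--                 t = "v"
--             else:
--                 t = ""
--             toks.append((t, False, False))
--             i += 1
--         elif word[i] in consonants:
--             toks.append((word[i], False, False))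
--             i += 1
--         else:
--             toks.append((word[i], False, True))
--             i += 1
--     return toks
--
-- def pronounce(word):
--     toks = _tokens(word.lower())
--     parts = []
--     for j, (text, isv, _) in enumerate(toks):
--         parts.append(text)
--         if isv and j + 1 < len(toks) and not toks[j + 1][2]:
--             parts.append("-")
--     return "".join(parts).capitalize()
-- ===== Notes on version B (the rewrite author's own statement) =====
-- stated objective: alternative
-- what changed: B separates matching from hyphenation: one scan produces a token list (emitted text, ends-on-vowel flag, boundary flag), then a second pass joins tokens inserting '-' only before a non-boundary successor, so the mutable output string and the strip('-') backtracking at spaces/apostrophes disappear.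
-- outside the precondition, e.g. on pronounce('-'): A does not finish within the time limit, B returns '-'
import Mathlib
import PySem

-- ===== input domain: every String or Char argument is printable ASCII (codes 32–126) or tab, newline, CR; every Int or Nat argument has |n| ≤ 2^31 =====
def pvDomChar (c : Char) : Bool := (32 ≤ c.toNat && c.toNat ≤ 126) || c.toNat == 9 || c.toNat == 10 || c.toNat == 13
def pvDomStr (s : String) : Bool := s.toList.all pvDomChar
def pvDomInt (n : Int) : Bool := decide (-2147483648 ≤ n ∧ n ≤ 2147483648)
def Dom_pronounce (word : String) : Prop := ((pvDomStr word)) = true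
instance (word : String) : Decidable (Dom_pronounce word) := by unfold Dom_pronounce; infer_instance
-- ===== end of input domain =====

-- B separates matching from hyphenation: one scan builds a token list, a second pass joins with
-- hyphens, replacing A's mutable output string and its strip('-') backtracking at boundaries.

-- ===== PORT A =====
-- shared module constants (doubleVowels / vowels / consonants from the Python module)
def pvDV (a b : Char) : Option (List Char) :=
  if a = 'e' ∧ b = 'i' then some ['a', 'y']
  else if a = 'a' ∧ b = 'i' then some ['e', 'y', 'e']
  else if a = 'a' ∧ b = 'e' then some ['e', 'y', 'e']
  else if a = 'a' ∧ b = 'o' then some ['o', 'w']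
  else if a = 'a' ∧ b = 'u' then some ['o', 'w']
  else if a = 'e' ∧ b = 'u' then some ['e', 'h', '-', 'o', 'o']
  else if a = 'i' ∧ b = 'u' then some ['e', 'w']
  else if a = 'o' ∧ b = 'i' then some ['o', 'y', 'o']
  else if a = 'o' ∧ b = 'u' then some ['o', 'w']
  else if a = 'u' ∧ b = 'i' then some ['o', 'o', 'e', 'y']
  else none

def pvVow (c : Char) : Option (List Char) :=
  if c = 'a' then some ['a', 'h']
  else if c = 'i' then some ['e', 'e']
  else if c = 'e' then some ['e', 'h']
  else if c = 'o' then some ['o', 'h']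
  else if c = 'u' then some ['o', 'o']
  else none

def pvCons : List Char := ['h', 'w', 'k', 'p', 'l', 'm', 'n']

-- A's inner w-rule (if index == 0 / prev 'a' / prev in "ie" / prev in "uo" / else nothing)
def pvWEmitA (l : List Char) (i : Nat) : List Char :=
  if i = 0 then ['w']
  else if l.getD (i - 1) ' ' = 'a' then ['w']
  else if l.getD (i - 1) ' ' = 'i' ∨ l.getD (i - 1) ' ' = 'e' then ['v']
  else if l.getD (i - 1) ' ' = 'u' ∨ l.getD (i - 1) ' ' = 'o' then ['w']
  else []

-- Python str.capitalize(): first char uppercased, the rest lowercased (exact on the ASCII domain)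
def pvCap : List Char → List Char
  | [] => []
  | c :: cs => PySem.Chars.upperChar c :: cs.map PySem.Chars.lowerChar

-- A's while loop; fuel = word length (one unit per iteration suffices: every iteration that
-- advances consumes ≥ 1 character; on characters outside Pre_ Python's loop never advances and
-- never terminates, so fuel exhaustion is unreachable on inputs where A returns).
def pvLoopA (l : List Char) : Nat → Nat → List Char → List Char
  | 0, _, out => out
  | f + 1, i, out =>
    if i < l.length then
      let step : Nat × List Char :=
        match (if i + 1 < l.length then pvDV (l.getD i ' ') (l.getD (i + 1) ' ') else none) with
        | some e => (i + 2, out ++ e)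
        | none =>
          match pvVow (l.getD i ' ') with
          | some e => (i + 1, out ++ e)
          | none =>
            if l.getD i ' ' ∈ pvCons then
              if l.getD i ' ' = 'w' then (i + 1, out ++ pvWEmitA l i)
              else (i + 1, out ++ [l.getD i ' '])
            else if l.getD i ' ' = ' ' then
              (i + 1, PySem.Chars.stripChars out ['-'] ++ [' '])
            else if l.getD i ' ' = '\'' then
              (i + 1, PySem.Chars.stripChars out ['-'] ++ ['\''])
            else (i, out)  -- no branch fires: Python loops forever here (outside Pre_)
      if l.length ≤ step.1 ∨ l.getD (step.1 - 1) ' ' = '\'' ∨ l.getD (step.1 - 1) ' ' = ' '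
          ∨ l.getD (step.1 - 1) ' ' ∈ pvCons then
        pvLoopA l f step.1 step.2
      else
        pvLoopA l f step.1 (step.2 ++ ['-'])
    else out

def pronounce (word : String) : String :=
  let l := (PySem.Str.lower word).toList
  String.ofList (pvCap (pvLoopA l l.length 0 []))

-- ===== PORT B =====
-- B's w-rule (i == 0 or prev in "aou" → "w"; prev in "ie" → "v"; else silent)
def pvWEmitB (l : List Char) (i : Nat) : List Char :=
  if i = 0 ∨ l.getD (i - 1) ' ' = 'a' ∨ l.getD (i - 1) ' ' = 'o' ∨ l.getD (i - 1) ' ' = 'u' then ['w']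
  else if l.getD (i - 1) ' ' = 'i' ∨ l.getD (i - 1) ' ' = 'e' then ['v']
  else []

-- pass 1: (emitted text, ends-on-vowel, is-boundary) per consumed unit
def pvTokens (l : List Char) : Nat → Nat → List (List Char × Bool × Bool)
  | 0, _ => []
  | f + 1, i =>
    if i < l.length then
      match (if i + 1 < l.length then pvDV (l.getD i ' ') (l.getD (i + 1) ' ') else none) with
      | some e => (e, true, false) :: pvTokens l f (i + 2)
      | none =>
        match pvVow (l.getD i ' ') with
        | some e => (e, true, false) :: pvTokens l f (i + 1)
        | none =>
          if l.getD i ' ' = 'w' then (pvWEmitB l i, false, false) :: pvTokens l f (i + 1)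
          else if l.getD i ' ' ∈ pvCons then ([l.getD i ' '], false, false) :: pvTokens l f (i + 1)
          else ([l.getD i ' '], false, true) :: pvTokens l f (i + 1)
    else []

-- pass 2: join tokens, '-' after a vowel token whose successor exists and is not a boundary
def pvRender : List (List Char × Bool × Bool) → List Char
  | [] => []
  | (t, isv, _) :: rest =>
    t ++ (if isv = true ∧ rest ≠ [] ∧ (rest.headD ([], false, false)).2.2 = false then ['-'] else [])
      ++ pvRender rest

def pronounce_alt (word : String) : String :=
  let l := (PySem.Str.lower word).toList
  String.ofList (pvCap (pvRender (pvTokens l l.length 0)))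

-- ===== PRECONDITION & SPEC =====
def pvAllowed : List Char :=
  ['a', 'e', 'i', 'o', 'u', 'h', 'w', 'k', 'p', 'l', 'm', 'n', ' ', '\'']

-- Pre_ excludes exactly the inputs containing a character (after lower()) that no branch of A's
-- while loop handles: there A never advances the index and loops forever (A does not return).
def Pre_pronounce (word : String) : Prop :=
  ((PySem.Str.lower word).toList.all (fun c => pvAllowed.contains c)) = true
instance (word : String) : Decidable (Pre_pronounce word) := by unfold Pre_pronounce; infer_instance

def pvWitness_pronounce : String := "Hawai'i"

def Spec_pronounce (word : String) (out : String) : Prop := out = pronounce_alt word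
instance (word : String) (out : String) : Decidable (Spec_pronounce word out) := by unfold Spec_pronounce; infer_instance

-- ===== CLAIM (what is proved, stated in full; the proofs are below) =====
def Claim_equal_pronounce : Prop :=
  ∀ (word : String), Dom_pronounce word → Pre_pronounce word → Spec_pronounce word (pronounce word)

-- ===== LEMMAS AND PROOFS =====

def pvIsVow (c : Char) : Prop := c = 'a' ∨ c = 'e' ∨ c = 'i' ∨ c = 'o' ∨ c = 'u'

-- invariant on A's accumulated output: no leading and no trailing '-'
def GoodOut (out : List Char) : Prop :=
  out.head? ≠ some '-' ∧ out.getLast? ≠ some '-'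

theorem pvDV_spec {a b : Char} {e : List Char} (h : pvDV a b = some e) :
    e ≠ [] ∧ e.head? ≠ some '-' ∧ e.getLast? ≠ some '-' ∧ pvIsVow a ∧ pvIsVow b := by
  unfold pvDV at h
  split_ifs at h <;> simp_all [pvIsVow] <;> subst h <;> decide

theorem pvVow_spec {c : Char} {e : List Char} (h : pvVow c = some e) :
    e ≠ [] ∧ e.head? ≠ some '-' ∧ e.getLast? ≠ some '-' ∧ pvIsVow c := by
  unfold pvVow at h
  split_ifs at h <;> simp_all [pvIsVow] <;> subst h <;> decide

theorem pvIsVow_facts {c : Char} (h : pvIsVow c) :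
    c ≠ ' ' ∧ c ≠ '\'' ∧ c ∉ pvCons := by
  rcases h with h | h | h | h | h <;> subst h <;> decide

theorem pvWEmitA_cases (l : List Char) (i : Nat) :
    pvWEmitA l i = [] ∨ pvWEmitA l i = ['w'] ∨ pvWEmitA l i = ['v'] := by
  unfold pvWEmitA; split_ifs <;> simp

theorem pvWEmitA_ne_nil (l : List Char) (i : Nat) (h0 : i ≠ 0)
    (hv : pvIsVow (l.getD (i - 1) ' ')) : pvWEmitA l i ≠ [] := by
  unfold pvWEmitA
  rcases hv with h | h | h | h | h <;> rw [h] <;> split_ifs <;> simp_all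

theorem pvWEmitB_eq (l : List Char) (i : Nat) : pvWEmitB l i = pvWEmitA l i := by
  unfold pvWEmitA pvWEmitB
  by_cases h0 : i = 0
  · simp [h0]
  · by_cases ha : l[i - 1]?.getD ' ' = 'a'
    · simp [h0, ha]
    · by_cases hi' : l[i - 1]?.getD ' ' = 'i'
      · simp [h0, hi']
      · by_cases he : l[i - 1]?.getD ' ' = 'e'
        · simp [h0, he]
        · by_cases ho : l[i - 1]?.getD ' ' = 'o'
          · simp [h0, ho]
          · by_cases hu : l[i - 1]?.getD ' ' = 'u'
            · simp [h0, hu]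
            · simp [h0, ha, hi', he, ho, hu]

theorem pvFalseIff {c : Char} (h1 : c ≠ ' ') (h2 : c ≠ '\'') :
    (false = true ↔ (c = ' ' ∨ c = '\'')) := by
  constructor
  · intro hh; exact absurd hh (by decide)
  · intro hh; rcases hh with hh | hh
    · exact absurd hh h1
    · exact absurd hh h2

theorem goodOut_append {out e : List Char} (h : GoodOut out)
    (he : e.head? ≠ some '-') (hl : e.getLast? ≠ some '-') : GoodOut (out ++ e) := by
  obtain ⟨h1, h2⟩ := h
  constructor
  · cases out with
    | nil => simpa using he
    | cons a t => simpa using h1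
  · cases e with
    | nil => simpa using h2
    | cons a t => rw [List.getLast?_append_of_ne_nil out (by simp)]; exact hl

theorem goodOut_append3 {p e : List Char} (hp : GoodOut p) (hpne : p ≠ [])
    (he : e ≠ []) (hl : e.getLast? ≠ some '-') : GoodOut (p ++ ['-'] ++ e) := by
  obtain ⟨h1, h2⟩ := hp
  constructor
  · cases p with
    | nil => exact absurd rfl hpne
    | cons a t => simpa using h1
  · rw [List.getLast?_append_of_ne_nil (p ++ ['-']) he]; exact hl

theorem strip_of_good {q : List Char} (h : GoodOut q) :
    PySem.Chars.stripChars q ['-'] = q := by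
  obtain ⟨h1, h2⟩ := h
  simp only [PySem.Chars.stripChars]
  cases q with
  | nil => rfl
  | cons a t =>
    have ha : a ≠ '-' := by simpa using h1
    rw [List.dropWhile_cons_of_neg (by simpa using ha)]
    rcases hr : (a :: t).reverse with _ | ⟨x, r⟩
    · simp at hr
    · have hx : (a :: t).getLast? = some x := by
        rw [← List.head?_reverse, hr]; rfl
      have hx' : x ≠ '-' := fun hh => h2 (by rw [hx, hh])
      rw [List.dropWhile_cons_of_neg (by simpa using hx'), ← hr, List.reverse_reverse]

theorem strip_append_dash {p : List Char} (h : GoodOut p) (hne : p ≠ []) :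
    PySem.Chars.stripChars (p ++ ['-']) ['-'] = p := by
  obtain ⟨h1, h2⟩ := h
  simp only [PySem.Chars.stripChars]
  cases p with
  | nil => exact absurd rfl hne
  | cons a t =>
    have ha : a ≠ '-' := by simpa using h1
    rw [show (a :: t) ++ ['-'] = a :: (t ++ ['-']) from rfl]
    rw [List.dropWhile_cons_of_neg (by simpa using ha)]
    rw [show a :: (t ++ ['-']) = (a :: t) ++ ['-'] from rfl]
    rw [List.reverse_append]
    rw [show (['-'] : List Char).reverse = '-' :: [] from rfl]
    rw [List.cons_append, List.dropWhile_cons_of_pos (by simp), List.nil_append]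
    rcases hr : (a :: t).reverse with _ | ⟨x, r⟩
    · simp at hr
    · have hx : (a :: t).getLast? = some x := by
        rw [← List.head?_reverse, hr]; rfl
      have hx' : x ≠ '-' := fun hh => h2 (by rw [hx, hh])
      rw [List.dropWhile_cons_of_neg (by simpa using hx'), ← hr, List.reverse_reverse]

theorem pvGetD_mem {l : List Char} {i : Nat} (h : i < l.length) : l.getD i ' ' ∈ l := by
  rw [List.getD_eq_getElem l ' ' h]
  exact List.getElem_mem h

theorem pvTokens_nil (l : List Char) (f i : Nat) (h : l.length ≤ i) :
    pvTokens l f i = [] := by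
  cases f with
  | zero => rfl
  | succ f => unfold pvTokens; rw [if_neg (by omega)]

theorem pvTokens_cons (l : List Char) (f i : Nat) (hi : i < l.length)
    (hc : l.getD i ' ' ∈ pvAllowed) :
    ∃ t rest, pvTokens l (f + 1) i = t :: rest ∧
      (t.2.2 = true ↔ (l.getD i ' ' = ' ' ∨ l.getD i ' ' = '\'')) := by
  unfold pvTokens
  rw [if_pos hi]
  rcases hdv : (if i + 1 < l.length then pvDV (l.getD i ' ') (l.getD (i + 1) ' ') else none) with _ | e
  · rcases hvw : pvVow (l.getD i ' ') with _ | e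
    · by_cases hw : l.getD i ' ' = 'w'
      · rw [if_pos hw]
        exact ⟨_, _, rfl, pvFalseIff (by rw [hw]; decide) (by rw [hw]; decide)⟩
      · rw [if_neg hw]
        by_cases hcs : l.getD i ' ' ∈ pvCons
        · rw [if_pos hcs]
          refine ⟨_, _, rfl, ?_⟩
          simp only [pvCons, List.mem_cons, List.not_mem_nil, or_false] at hcs
          rcases hcs with h | h | h | h | h | h | h <;>
            exact pvFalseIff (by rw [h]; decide) (by rw [h]; decide)
        · rw [if_neg hcs]
          simp only [pvAllowed, List.mem_cons, List.not_mem_nil, or_false] at hc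
          have hb : l.getD i ' ' = ' ' ∨ l.getD i ' ' = '\'' := by
            rcases hc with h | h | h | h | h | h | h | h | h | h | h | h | h | h
            · rw [h] at hvw; exact absurd hvw (by decide)
            · rw [h] at hvw; exact absurd hvw (by decide)
            · rw [h] at hvw; exact absurd hvw (by decide)
            · rw [h] at hvw; exact absurd hvw (by decide)
            · rw [h] at hvw; exact absurd hvw (by decide)
            · rw [h] at hcs; exact absurd (by decide) hcs
            · exact absurd h hw
            · rw [h] at hcs; exact absurd (by decide) hcs
            · rw [h] at hcs; exact absurd (by decide) hcs
            · rw [h] at hcs; exact absurd (by decide) hcs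
            · rw [h] at hcs; exact absurd (by decide) hcs
            · rw [h] at hcs; exact absurd (by decide) hcs
            · exact Or.inl h
            · exact Or.inr h
          exact ⟨_, _, rfl, ⟨fun _ => hb, fun _ => rfl⟩⟩
    · have hv := pvIsVow_facts (pvVow_spec hvw).2.2.2
      exact ⟨_, _, rfl, pvFalseIff hv.1 hv.2.1⟩
  · have hi1 : i + 1 < l.length := by
      by_contra hn
      rw [if_neg hn] at hdv; simp at hdv
    rw [if_pos hi1] at hdv
    have hv := pvIsVow_facts (pvDV_spec hdv).2.2.2.1
    exact ⟨_, _, rfl, pvFalseIff hv.1 hv.2.1⟩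

theorem pvBoundary_of {c : Char} (hc : c ∈ pvAllowed) (hvw : pvVow c = none)
    (hcons : c ∉ pvCons) : c = ' ' ∨ c = '\'' := by
  simp only [pvAllowed, List.mem_cons, List.not_mem_nil, or_false] at hc
  rcases hc with h | h | h | h | h | h | h | h | h | h | h | h | h | h
  · rw [h] at hvw; exact absurd hvw (by decide)
  · rw [h] at hvw; exact absurd hvw (by decide)
  · rw [h] at hvw; exact absurd hvw (by decide)
  · rw [h] at hvw; exact absurd hvw (by decide)
  · rw [h] at hvw; exact absurd hvw (by decide)
  · rw [h] at hcons; exact absurd (by decide) hcons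
  · rw [h] at hcons; exact absurd (by decide) hcons
  · rw [h] at hcons; exact absurd (by decide) hcons
  · rw [h] at hcons; exact absurd (by decide) hcons
  · rw [h] at hcons; exact absurd (by decide) hcons
  · rw [h] at hcons; exact absurd (by decide) hcons
  · rw [h] at hcons; exact absurd (by decide) hcons
  · exact Or.inl h
  · exact Or.inr h

theorem pvCons_facts {c : Char} (h : c ∈ pvCons) : c ≠ ' ' ∧ c ≠ '\'' ∧ c ≠ '-' := by
  simp only [pvCons, List.mem_cons, List.not_mem_nil, or_false] at h
  rcases h with h | h | h | h | h | h | h <;> rw [h] <;> decide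

-- the induction statement: A's loop from state (i, out) equals out (with its pending '-'
-- resolved against the next character) followed by B's rendering of the remaining tokens
def pvMainP (l : List Char) (f : Nat) : Prop :=
  ∀ i : Nat, ∀ q : List Char, ∀ dash : Bool,
    GoodOut q →
    (dash = true → q ≠ [] ∧ i < l.length ∧ i ≠ 0 ∧ pvIsVow (l.getD (i - 1) ' ')) →
    l.length - i ≤ f →
    pvLoopA l f i (q ++ (if dash then ['-'] else [])) =
      q ++ (if dash = true ∧ ¬(l.getD i ' ' = ' ' ∨ l.getD i ' ' = '\'') then ['-'] else [])
        ++ pvRender (pvTokens l f i)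

theorem pvMainP_false {l : List Char} {f : Nat} (ih : pvMainP l f) (i : Nat)
    (Q : List Char) (hQ : GoodOut Q) (hf : l.length - i ≤ f) :
    pvLoopA l f i Q = Q ++ pvRender (pvTokens l f i) := by
  have h := ih i Q false hQ (by simp) hf
  simpa using h

theorem pvVowTail (l : List Char) (H : ∀ c ∈ l, c ∈ pvAllowed) (f j : Nat)
    (ih : pvMainP l f) (Q : List Char) (hQ : GoodOut Q) (hQne : Q ≠ []) (hj0 : j ≠ 0)
    (hvj : pvIsVow (l.getD (j - 1) ' ')) (hf : l.length - j ≤ f) :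
    (if l.length ≤ j ∨ l.getD (j - 1) ' ' = '\'' ∨ l.getD (j - 1) ' ' = ' '
        ∨ l.getD (j - 1) ' ' ∈ pvCons
      then pvLoopA l f j Q else pvLoopA l f j (Q ++ ['-'])) =
    Q ++ (if pvTokens l f j ≠ [] ∧ ((pvTokens l f j).headD ([], false, false)).2.2 = false
            then ['-'] else [])
      ++ pvRender (pvTokens l f j) := by
  have hvf := pvIsVow_facts hvj
  by_cases hlen : l.length ≤ j
  · rw [if_pos (Or.inl hlen)]
    have h1 := ih j Q false hQ (by simp) (by omega)
    rw [pvTokens_nil l f j hlen] at h1 ⊢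
    simpa [pvRender] using h1
  · have hjlt : j < l.length := by omega
    rw [if_neg (by
      simp only [not_or]
      exact ⟨hlen, hvf.2.1, hvf.1, hvf.2.2⟩)]
    have step := ih j Q true hQ (fun _ => ⟨hQne, hjlt, hj0, hvj⟩) (by omega)
    simp only [true_and, if_true] at step
    rw [step]
    rcases f with _ | f'
    · omega
    · obtain ⟨t, rest, htk, hflag⟩ := pvTokens_cons l f' j hjlt (H _ (pvGetD_mem hjlt))
      rw [htk]
      by_cases hb : (l.getD j ' ' = ' ' ∨ l.getD j ' ' = '\'')
      · have ht : t.2.2 = true := hflag.mpr hb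
        rw [if_neg (not_not_intro hb), if_neg (by simp [ht])]
      · have ht : t.2.2 = false := by
          cases hx : t.2.2
          · rfl
          · exact absurd (hflag.mp hx) hb
        rw [if_pos hb, if_pos ⟨by simp, ht⟩]

theorem pvMain (l : List Char) (H : ∀ c ∈ l, c ∈ pvAllowed) : ∀ f : Nat, pvMainP l f := by
  intro f
  induction f with
  | zero =>
    intro i q dash hq hd hf
    cases dash with
    | false => simp [pvLoopA, pvTokens, pvRender]
    | true => exact absurd (hd rfl).2.1 (by omega)
  | succ f ih =>
    intro i q dash hq hd hf
    by_cases hi : i < l.length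
    case neg =>
      cases dash with
      | true => exact absurd (hd rfl).2.1 hi
      | false =>
        rw [pvTokens_nil l _ _ (by omega)]
        simp [pvLoopA, hi, pvRender]
    case pos =>
      have hc : l.getD i ' ' ∈ pvAllowed := H _ (pvGetD_mem hi)
      simp only [pvLoopA, pvTokens, if_pos hi]
      rcases hdv : (if i + 1 < l.length then pvDV (l.getD i ' ') (l.getD (i + 1) ' ') else none) with _ | e
      · -- no double vowel at i
        rcases hvw : pvVow (l.getD i ' ') with _ | e
        · -- not a single vowel either: w / consonant / boundary
          by_cases hcons : l.getD i ' ' ∈ pvCons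
          · by_cases hw : l.getD i ' ' = 'w'
            · -- the letter w
              simp only [if_pos hcons, if_pos hw, pvWEmitB_eq]
              have hnb : ¬(l.getD i ' ' = ' ' ∨ l.getD i ' ' = '\'') := by rw [hw]; decide
              have hQ' : GoodOut ((q ++ (if dash = true then ['-'] else [])) ++ pvWEmitA l i) := by
                have hE := pvWEmitA_cases l i
                cases dash with
                | false =>
                  refine goodOut_append (by simpa using hq) ?_ ?_ <;>
                    rcases hE with hE | hE | hE <;> rw [hE] <;> decide
                | true =>
                  obtain ⟨hqne, _, hi0, hvprev⟩ := hd rfl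
                  have hEne := pvWEmitA_ne_nil l i hi0 hvprev
                  rcases hE with hE | hE | hE
                  · exact absurd hE hEne
                  · exact goodOut_append3 hq hqne (by rw [hE]; decide) (by rw [hE]; decide)
                  · exact goodOut_append3 hq hqne (by rw [hE]; decide) (by rw [hE]; decide)
              rw [if_pos (by
                simp only [Nat.add_sub_cancel]
                exact Or.inr (Or.inr (Or.inr hcons)))]
              rw [pvMainP_false ih (i + 1) _ hQ' (by omega)]
              obtain ⟨hnb1, hnb2⟩ : ¬(l[i]?.getD ' ' = ' ') ∧ ¬(l[i]?.getD ' ' = '\'') :=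
                ⟨fun h => hnb (Or.inl h), fun h => hnb (Or.inr h)⟩
              simp [pvRender, hnb1, hnb2, List.append_assoc]
            · -- another consonant
              simp only [if_pos hcons, if_neg hw]
              have hcf := pvCons_facts hcons
              have hnb : ¬(l.getD i ' ' = ' ' ∨ l.getD i ' ' = '\'') := by
                intro h; rcases h with h | h
                · exact hcf.1 h
                · exact hcf.2.1 h
              have hQ' : GoodOut ((q ++ (if dash = true then ['-'] else [])) ++ [l.getD i ' ']) := by
                cases dash with
                | false => exact goodOut_append (by simpa using hq) (by simp; exact hcf.2.2) (by simp; exact hcf.2.2)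
                | true => exact goodOut_append3 hq (hd rfl).1 (by simp) (by simp; exact hcf.2.2)
              rw [if_pos (by
                simp only [Nat.add_sub_cancel]
                exact Or.inr (Or.inr (Or.inr hcons)))]
              rw [pvMainP_false ih (i + 1) _ hQ' (by omega)]
              obtain ⟨hnb1, hnb2⟩ : ¬(l[i]?.getD ' ' = ' ') ∧ ¬(l[i]?.getD ' ' = '\'') :=
                ⟨fun h => hnb (Or.inl h), fun h => hnb (Or.inr h)⟩
              simp [pvRender, hnb1, hnb2, List.append_assoc]
          · -- boundary: space or apostrophe
            have hw : ¬(l.getD i ' ' = 'w') := fun h => hcons (by rw [h]; decide)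
            have hst : PySem.Chars.stripChars (q ++ (if dash = true then ['-'] else [])) ['-'] = q := by
              cases dash with
              | false => simpa using strip_of_good hq
              | true => simpa using strip_append_dash hq (hd rfl).1
            rcases pvBoundary_of hc hvw hcons with hbd | hbd
            · simp only [if_neg hcons, if_pos hbd, if_neg hw, hst]
              have hQ' : GoodOut (q ++ [' ']) :=
                goodOut_append hq (by decide) (by decide)
              rw [if_pos (by
                simp only [Nat.add_sub_cancel]
                rw [hbd]
                exact Or.inr (Or.inr (Or.inl rfl)))]
              rw [pvMainP_false ih (i + 1) _ hQ' (by omega)]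
              have hbd' : l[i]?.getD ' ' = ' ' := hbd
              simp [pvRender, hbd', List.append_assoc]
            · simp only [if_neg hcons, if_neg (by rw [hbd]; decide : ¬(l.getD i ' ' = ' ')),
                if_pos hbd, if_neg hw, hst]
              have hQ' : GoodOut (q ++ ['\'']) :=
                goodOut_append hq (by decide) (by decide)
              rw [if_pos (by
                simp only [Nat.add_sub_cancel]
                rw [hbd]
                exact Or.inr (Or.inl rfl))]
              rw [pvMainP_false ih (i + 1) _ hQ' (by omega)]
              have hbd' : l[i]?.getD ' ' = '\'' := hbd
              simp [pvRender, hbd', List.append_assoc]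
        · -- single vowel
          obtain ⟨hene, heh, hel, hva⟩ := pvVow_spec hvw
          have hnb : ¬(l.getD i ' ' = ' ' ∨ l.getD i ' ' = '\'') := by
            have := pvIsVow_facts hva
            intro h; rcases h with h | h
            · exact this.1 h
            · exact this.2.1 h
          have hQ' : GoodOut ((q ++ (if dash = true then ['-'] else [])) ++ e) := by
            cases dash with
            | false => exact goodOut_append (by simpa using hq) heh hel
            | true => exact goodOut_append3 hq (hd rfl).1 hene hel
          have hQne' : ((q ++ (if dash = true then ['-'] else [])) ++ e) ≠ [] := by
            simp [hene]
          rw [pvVowTail l H f (i + 1) ih _ hQ' hQne' (by omega) (by simpa using hva) (by omega)]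
          obtain ⟨hnb1, hnb2⟩ : ¬(l[i]?.getD ' ' = ' ') ∧ ¬(l[i]?.getD ' ' = '\'') :=
            ⟨fun h => hnb (Or.inl h), fun h => hnb (Or.inr h)⟩
          simp [pvRender, hnb1, hnb2, List.append_assoc]
      · -- double vowel at i
        have hi1 : i + 1 < l.length := by
          by_contra hn; rw [if_neg hn] at hdv; simp at hdv
        rw [if_pos hi1] at hdv
        obtain ⟨hene, heh, hel, hva, hvb⟩ := pvDV_spec hdv
        have hnb : ¬(l.getD i ' ' = ' ' ∨ l.getD i ' ' = '\'') := by
          have := pvIsVow_facts hva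
          intro h; rcases h with h | h
          · exact this.1 h
          · exact this.2.1 h
        have hQ' : GoodOut ((q ++ (if dash = true then ['-'] else [])) ++ e) := by
          cases dash with
          | false => exact goodOut_append (by simpa using hq) heh hel
          | true => exact goodOut_append3 hq (hd rfl).1 hene hel
        have hQne' : ((q ++ (if dash = true then ['-'] else [])) ++ e) ≠ [] := by
          simp [hene]
        rw [pvVowTail l H f (i + 2) ih _ hQ' hQne' (by omega) (by simpa using hvb) (by omega)]
        obtain ⟨hnb1, hnb2⟩ : ¬(l[i]?.getD ' ' = ' ') ∧ ¬(l[i]?.getD ' ' = '\'') :=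
          ⟨fun h => hnb (Or.inl h), fun h => hnb (Or.inr h)⟩
        simp [pvRender, hnb1, hnb2, List.append_assoc]

theorem pronounce_eq (word : String) (h : Pre_pronounce word) :
    pronounce word = pronounce_alt word := by
  have H : ∀ c ∈ (PySem.Str.lower word).toList, c ∈ pvAllowed := by
    intro c hc
    simpa using List.all_eq_true.mp h c hc
  simp only [pronounce, pronounce_alt]
  have hm := pvMainP_false (pvMain ((PySem.Str.lower word).toList) H
      ((PySem.Str.lower word).toList.length)) 0 [] ⟨by simp, by simp⟩ (by omega)
  simp only [List.nil_append] at hm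
  rw [hm]

-- ===== VERDICT (by name: the statement is the Claim_ definition above) =====
theorem pronounce_spec : Claim_equal_pronounce := by
  intro word _ hpre
  unfold Spec_pronounce
  exact pronounce_eq word hpre
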